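-- pv_equiv track=rewrite | github.com/lahinlihi/Searcher | deduplication.py | merge_duplicates
-- ===== SOURCE A (Python) =====
-- def merge_duplicates(tenders):
--     """
--     중복 공고 병합 (같은 공고의 다른 버전)
--
--     Args:
--         tenders (list): 공고 리스트
--
--     Returns:
--         list: 병합된 공고 리스트
--     """
--     # 공고번호별로 그룹화
--     grouped = {}
--
--     for tender in tenders:
--         tender_number = tender.get('tender_number')
--         if not tender_number:
--             continue
--
--         if tender_number not in grouped:
--             grouped[tender_number] = []
--         grouped[tender_number].append(tender)
--
--     # 각 그룹에서 최신 공고만 유지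
--     merged = []
--     for tender_number, group in grouped.items():
--         if len(group) == 1:
--             merged.append(group[0])
--         else:
--             # 가장 최근에 크롤링된 것 선택
--             latest = max(group, key=lambda x: x.get('announced_date', ''))
--             merged.append(latest)
--
--     return merged
-- ===== SOURCE B (Python) =====
-- def merge_duplicates(tenders):
--     """Single-pass merge: keep, per tender_number, the entry with the greatest
--     announced_date (first one wins on ties), in first-occurrence order."""
--     best = {}
--     for tender in tenders:
--         tender_number = tender.get('tender_number')
--         if not tender_number:
--             continue
--         cur = best.get(tender_number)
--         if cur is None:
--             best[tender_number] = tender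
--         elif cur.get('announced_date', '') < tender.get('announced_date', ''):
--             best[tender_number] = tender
--     return list(best.values())
-- ===== Notes on version B (the rewrite author's own statement) =====
-- stated objective: simpler
-- what changed: Replaces the group-then-reduce two-phase structure (build lists per tender_number, then a second loop taking max of each group) with a single pass keeping one best tender per number in a dict, returning its values.
import Mathlib
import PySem

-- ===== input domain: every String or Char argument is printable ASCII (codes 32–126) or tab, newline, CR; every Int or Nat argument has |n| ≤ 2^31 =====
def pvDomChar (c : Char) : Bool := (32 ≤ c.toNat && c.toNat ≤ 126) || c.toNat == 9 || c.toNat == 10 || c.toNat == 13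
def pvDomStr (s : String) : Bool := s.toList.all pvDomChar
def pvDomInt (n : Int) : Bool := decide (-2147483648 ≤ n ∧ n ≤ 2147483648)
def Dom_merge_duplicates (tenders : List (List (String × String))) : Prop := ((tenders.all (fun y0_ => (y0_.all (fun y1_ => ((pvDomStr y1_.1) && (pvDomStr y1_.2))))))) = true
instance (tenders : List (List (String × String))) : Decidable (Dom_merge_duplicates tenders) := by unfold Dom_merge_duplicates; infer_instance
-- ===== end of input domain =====

-- B replaces A's group-then-reduce two-phase structure with a single pass keeping one
-- best tender per number (objective: simpler); same return value, no speed claim.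

-- shared helper: tender.get(k, '') / truthiness of tender.get(k)
-- (first-match association-list lookup, per the dict convention; '' stands for both
-- a missing key (None) and an empty string, which Python treats alike here: both are
-- falsy, and '' is exactly the max-key default)
def pvGet (t : List (String × String)) (k : String) : String :=
  ((t.find? (fun p => p.1 == k)).map (fun p => p.2)).getD ""

-- ===== PORT A =====
-- body of A's first loop: skip falsy tender_number, else grouped[tn].append(tender)
def stepA (g : PySem.Dict String (List (List (String × String))))
    (t : List (String × String)) : PySem.Dict String (List (List (String × String))) :=
  let tn := pvGet t "tender_number"
  if tn = "" then g else g.modify tn [] (fun grp => grp ++ [t])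

-- A: group by tender_number, then per group keep group[0] (singleton) or
-- max(group, key=announced_date).  Groups are never empty, so the 'none' arm of
-- max? (Python: 'max of empty raises') is unreachable.
def merge_duplicates (tenders : List (List (String × String))) : List (List (String × String)) :=
  let grouped := tenders.foldl stepA PySem.Dict.empty
  grouped.items.foldl (fun merged p =>
    if p.2.length = 1 then merged ++ [p.2.headD []]
    else merged ++ [(PySem.List.max? p.2 (fun x => pvGet x "announced_date")).getD []]) []

-- ===== PORT B =====
-- body of B's loop: keep the best tender per number, replace only on strictly greater date
def stepB (best : PySem.Dict String (List (String × String)))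
    (t : List (String × String)) : PySem.Dict String (List (String × String)) :=
  let tn := pvGet t "tender_number"
  if tn = "" then best
  else match best.get? tn with
    | none => best.insert tn t
    | some cur => if pvGet cur "announced_date" < pvGet t "announced_date" then best.insert tn t else best

def merge_duplicates_alt (tenders : List (List (String × String))) : List (List (String × String)) :=
  (tenders.foldl stepB PySem.Dict.empty).values

-- ===== PRECONDITION & SPEC =====
def Spec_merge_duplicates (tenders : List (List (String × String))) (out : List (List (String × String))) : Prop := out = merge_duplicates_alt tenders
instance (tenders : List (List (String × String))) (out : List (List (String × String))) : Decidable (Spec_merge_duplicates tenders out) := by unfold Spec_merge_duplicates; infer_instance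

-- ===== CLAIM (what is proved, stated in full; the proofs are below) =====
def Claim_equal_merge_duplicates : Prop := ∀ (tenders : List (List (String × String))), Dom_merge_duplicates tenders → Spec_merge_duplicates tenders (merge_duplicates tenders)

-- ===== LEMMAS AND PROOFS =====

-- the per-group value A computes (in the non-singleton branch) and B maintains incrementally
def fmax (g : List (List (String × String))) : List (String × String) :=
  (PySem.List.max? g (fun x => pvGet x "announced_date")).getD []

lemma max?_snoc {α κ : Type} [LT κ] [DecidableLT κ] (l : List α) (x : α) (key : α → κ) :
    PySem.List.max? (l ++ [x]) key =
      match PySem.List.max? l key with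
      | none => some x
      | some m => if key m < key x then some x else some m := by
  simp only [PySem.List.max?, List.foldl_append, List.foldl_cons, List.foldl_nil]
  cases List.foldl (fun acc x =>
      match acc with
      | none => some x
      | some m => if key m < key x then some x else some m) none l <;> rfl

-- looking a key up in the mapped items list is the mapped lookup
lemma find?_map_key (l : List (String × List (List (String × String)))) (k : String) :
    (l.map (fun p => (p.1, fmax p.2))).find? (fun p => p.1 == k)
      = (l.find? (fun p => p.1 == k)).map (fun p => (p.1, fmax p.2)) := by
  induction l with
  | nil => rfl
  | cons p l ih => by_cases h : p.1 == k <;> simp [h, ih]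

-- one step of the two loops preserves the simulation invariant
lemma inv_step (t : List (String × String))
    (g : PySem.Dict String (List (List (String × String))))
    (b : PySem.Dict String (List (String × String)))
    (hnd : g.keys.Nodup)
    (hrel : b.items = g.items.map (fun p => (p.1, fmax p.2)))
    (hne : ∀ p ∈ g.items, p.2 ≠ []) :
    (stepA g t).keys.Nodup ∧
    (stepB b t).items = (stepA g t).items.map (fun p => (p.1, fmax p.2)) ∧
    (∀ p ∈ (stepA g t).items, p.2 ≠ []) := by
  unfold stepA stepB
  by_cases htn : pvGet t "tender_number" = ""
  · simp only [if_pos htn]; exact ⟨hnd, hrel, hne⟩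
  set tn := pvGet t "tender_number" with htn_def
  simp only [if_neg htn]
  have hkeys : b.keys = g.keys := by
    simp only [PySem.Dict.keys, hrel, List.map_map]; rfl
  have hcont : b.contains tn = g.contains tn := by
    rw [PySem.Dict.contains_eq_decide_mem_keys, PySem.Dict.contains_eq_decide_mem_keys, hkeys]
  by_cases hc : g.contains tn = true
  · -- the key already has a group
    have hsome : (g.get? tn).isSome := by rw [← PySem.Dict.contains_eq_isSome_get?]; exact hc
    obtain ⟨old, hold⟩ := Option.isSome_iff_exists.mp hsome
    have hmem := PySem.Dict.mem_items_of_get?_eq_some g hold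
    have holdne : old ≠ [] := hne _ hmem
    obtain ⟨m, hm⟩ : ∃ m, PySem.List.max? old (fun x => pvGet x "announced_date") = some m := by
      cases hm0 : PySem.List.max? old (fun x => pvGet x "announced_date") with
      | none => exact absurd ((PySem.List.max?_eq_none_iff _ _).mp hm0) holdne
      | some m => exact ⟨m, rfl⟩
    have hfm : fmax old = m := by simp [fmax, hm]
    have hbget : b.get? tn = some (fmax old) := by
      simp only [PySem.Dict.get?] at hold ⊢
      rw [hrel, find?_map_key]
      obtain ⟨q, hq1, hq2⟩ := Option.map_eq_some_iff.mp hold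
      rw [hq1]; simp [hq2]
    have hbc : b.contains tn = true := by rw [hcont]; exact hc
    have hsnoc : fmax (old ++ [t]) =
        if pvGet m "announced_date" < pvGet t "announced_date" then t else m := by
      simp only [fmax, max?_snoc, hm]
      by_cases h : pvGet m "announced_date" < pvGet t "announced_date" <;> simp [h]
    simp only [PySem.Dict.modify, PySem.Dict.getD_of_get?_eq_some _ _ hold, hbget]
    refine ⟨?_, ?_, ?_⟩
    · rw [PySem.Dict.keys_insert_of_contains _ _ hc]; exact hnd
    · by_cases hlt : pvGet (fmax old) "announced_date" < pvGet t "announced_date"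
      · simp only [if_pos hlt]
        rw [PySem.Dict.items_insert_of_contains _ _ hbc,
            PySem.Dict.items_insert_of_contains _ _ hc, hrel,
            List.map_map, List.map_map]
        refine List.map_congr_left fun p hp => ?_
        by_cases hp1 : p.1 = tn
        · have htv : fmax (old ++ [t]) = t := by rw [hsnoc, if_pos]; rwa [hfm] at hlt
          simp [Function.comp, hp1, htv]
        · simp [Function.comp, hp1]
      · simp only [if_neg hlt]
        rw [PySem.Dict.items_insert_of_contains _ _ hc, hrel, List.map_map]
        refine (List.map_congr_left fun p hp => ?_).symm
        by_cases hp1 : p.1 = tn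
        · have hp2 : p.2 = old := by
            have h1 : g.get? p.1 = some p.2 :=
              PySem.Dict.get?_of_mem_items g (by simpa using hp) hnd
            rw [hp1, hold] at h1; exact (Option.some_injective _ h1).symm
          have htv : fmax (old ++ [t]) = m := by rw [hsnoc, if_neg]; rwa [hfm] at hlt
          simp [Function.comp, hp1, htv, hp2, hfm]
        · simp [Function.comp, hp1]
    · rw [PySem.Dict.items_insert_of_contains _ _ hc]
      intro p hp
      obtain ⟨q, hq, rfl⟩ := List.mem_map.mp hp
      by_cases hq1 : q.1 = tn <;> simp [hq1]
      exact hne q hq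
  · -- fresh key: both sides append
    have hcf : g.contains tn = false := by simpa using hc
    have hbc : b.contains tn = false := by rw [hcont]; exact hcf
    have hbget : b.get? tn = none := (PySem.Dict.get?_eq_none_iff_contains _ _).mpr hbc
    simp only [PySem.Dict.modify, PySem.Dict.getD_of_not_contains _ _ hcf, hbget]
    refine ⟨?_, ?_, ?_⟩
    · rw [PySem.Dict.keys_insert_of_not_contains _ _ hcf]
      have : tn ∉ g.keys := fun h => by
        simp [(PySem.Dict.contains_iff_mem_keys g tn).mpr h] at hcf
      simp only [List.nodup_append, List.nodup_singleton, true_and]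
      refine ⟨hnd, ?_⟩
      intro a ha x hx
      rw [List.mem_singleton] at hx
      subst hx
      exact fun h => this (h ▸ ha)
    · rw [PySem.Dict.items_insert_of_not_contains _ _ hcf,
          PySem.Dict.items_insert_of_not_contains _ _ hbc, hrel]
      simp [fmax, PySem.List.max?]
    · rw [PySem.Dict.items_insert_of_not_contains _ _ hcf]
      intro p hp
      rcases List.mem_append.mp hp with h | h
      · exact hne p h
      · simp at h; simp [h]

lemma inv_fold (l : List (List (String × String)))
    (g : PySem.Dict String (List (List (String × String))))
    (b : PySem.Dict String (List (String × String)))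
    (hnd : g.keys.Nodup)
    (hrel : b.items = g.items.map (fun p => (p.1, fmax p.2)))
    (hne : ∀ p ∈ g.items, p.2 ≠ []) :
    (l.foldl stepA g).keys.Nodup ∧
    (l.foldl stepB b).items = (l.foldl stepA g).items.map (fun p => (p.1, fmax p.2)) ∧
    (∀ p ∈ (l.foldl stepA g).items, p.2 ≠ []) := by
  induction l generalizing g b with
  | nil => exact ⟨hnd, hrel, hne⟩
  | cons t l ih =>
    obtain ⟨h1, h2, h3⟩ := inv_step t g b hnd hrel hne
    exact ih (stepA g t) (stepB b t) h1 h2 h3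

-- A's second loop is a map over the grouped items
lemma foldl_pick (items : List (String × List (List (String × String))))
    (acc : List (List (String × String))) :
    items.foldl (fun merged p =>
      if p.2.length = 1 then merged ++ [p.2.headD []]
      else merged ++ [(PySem.List.max? p.2 (fun x => pvGet x "announced_date")).getD []]) acc
    = acc ++ items.map (fun p => if p.2.length = 1 then p.2.headD [] else fmax p.2) := by
  induction items generalizing acc with
  | nil => simp
  | cons p items ih =>
    rw [List.foldl_cons, ← apply_ite (fun y => acc ++ [y]), ih]
    simp [fmax]

lemma pick_eq_fmax (g : List (List (String × String))) (h : g ≠ []) :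
    (if g.length = 1 then g.headD [] else fmax g) = fmax g := by
  by_cases h1 : g.length = 1
  · obtain ⟨x, rfl⟩ := List.length_eq_one_iff.mp h1
    simp [fmax, PySem.List.max?]
  · simp [h1]

-- ===== VERDICT (by name: the statement is the Claim_ definition above) =====
theorem merge_duplicates_spec : Claim_equal_merge_duplicates := by
  intro tenders _
  unfold Spec_merge_duplicates merge_duplicates merge_duplicates_alt
  obtain ⟨hnd, hrel, hne⟩ := inv_fold tenders PySem.Dict.empty PySem.Dict.empty
    (by simp [PySem.Dict.keys, PySem.Dict.empty]) (by rfl) (by simp [PySem.Dict.empty])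
  rw [foldl_pick, PySem.Dict.values, hrel]
  simp only [List.nil_append, List.map_map]
  exact List.map_congr_left fun p hp => by
    simpa using pick_eq_fmax p.2 (hne p hp)
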